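-- pv_equiv track=rewrite | github.com/furkanagamak/Scripting-Languages | CSE 337 Project 1 Python/agamak-project1.py | countValidStrings
-- ===== SOURCE A (Python) =====
-- from collections import deque
--
-- def isBalancedString(seqBrackets):
--     theBracketsStack = []
--     for theCharacter in seqBrackets:
--         if theCharacter in ["(", "{", "["]:
--             theBracketsStack.append(theCharacter)
--         else:
--             if not theBracketsStack:
--                 return False
--             if theCharacter == ")" and theBracketsStack[-1] != "(":
--                 return False
--             if theCharacter == "}" and theBracketsStack[-1] != "{":
--                 return False
--             if theCharacter == "]" and theBracketsStack[-1] != "[":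
--                 return False
--             theBracketsStack.pop()
--     return not theBracketsStack
--
-- def countValidStrings(seqBrackets):
--     if isBalancedString(seqBrackets):
--         return 0
--
--     bracketsVisited = set()
--     queueOfBrackets = deque([seqBrackets])
--     balancedSequences = set()
--     isBracketFound = False
--
--     while queueOfBrackets and not isBracketFound:
--         lengthOfSequence = len(queueOfBrackets)
--         for iteration in range(lengthOfSequence):
--             iteration = iteration + 1
--             theBracketString = queueOfBrackets.popleft()
--             for i in range(len(theBracketString)):
--                 uniqueString = theBracketString[:i] + theBracketString[i+1:]
--                 if uniqueString not in bracketsVisited: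
--                     bracketsVisited.add(uniqueString)
--                     if isBalancedString(uniqueString):
--                         balancedSequences.add(uniqueString)
--                         isBracketFound = True
--                     else:
--                         queueOfBrackets.append(uniqueString)
--
--     return len(balancedSequences)
-- ===== SOURCE B (Python) =====
-- def isBalancedString(seqBrackets):
--     theBracketsStack = []
--     for theCharacter in seqBrackets:
--         if theCharacter in ["(", "{", "["]:
--             theBracketsStack.append(theCharacter)
--         else:
--             if not theBracketsStack:
--                 return False
--             if theCharacter == ")" and theBracketsStack[-1] != "(":
--                 return False
--             if theCharacter == "}" and theBracketsStack[-1] != "{":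
--                 return False
--             if theCharacter == "]" and theBracketsStack[-1] != "[":
--                 return False
--             theBracketsStack.pop()
--     return not theBracketsStack
--
-- def _subseqs(s, m):
--     """All distinct subsequences of s having length m, as a set of strings."""
--     if m == 0:
--         return {""}
--     if len(s) < m:
--         return set()
--     withFirst = {s[0] + t for t in _subseqs(s[1:], m - 1)}
--     return withFirst | _subseqs(s[1:], m)
--
-- def countValidStrings(seqBrackets):
--     # Since every deletion removes exactly one character, the strings reachable by k
--     # deletions are exactly the distinct subsequences of length n-k: generate them
--     # combinatorially per k instead of searching with a BFS.
--     if isBalancedString(seqBrackets):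
--         return 0
--     n = len(seqBrackets)
--     for k in range(1, n + 1):
--         balanced = {t for t in _subseqs(seqBrackets, n - k) if isBalancedString(t)}
--         if balanced:
--             return len(balanced)
--     return 0  # unreachable: the empty string is balanced
-- ===== Notes on version B (the rewrite author's own statement) =====
-- stated objective: alternative
-- what changed: Replaces the one-deletion-at-a-time BFS with deque/visited-set/found-flag by direct combinatorial generation: for k = 1, 2, ... it builds the set of all distinct length-(n-k) subsequences by a recursive take-or-skip-the-first-character enumeration and returns the size of the first k whose set contains balanced strings (correct because k single deletions reach exactly the length-(n-k) subsequences).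
import Mathlib
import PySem

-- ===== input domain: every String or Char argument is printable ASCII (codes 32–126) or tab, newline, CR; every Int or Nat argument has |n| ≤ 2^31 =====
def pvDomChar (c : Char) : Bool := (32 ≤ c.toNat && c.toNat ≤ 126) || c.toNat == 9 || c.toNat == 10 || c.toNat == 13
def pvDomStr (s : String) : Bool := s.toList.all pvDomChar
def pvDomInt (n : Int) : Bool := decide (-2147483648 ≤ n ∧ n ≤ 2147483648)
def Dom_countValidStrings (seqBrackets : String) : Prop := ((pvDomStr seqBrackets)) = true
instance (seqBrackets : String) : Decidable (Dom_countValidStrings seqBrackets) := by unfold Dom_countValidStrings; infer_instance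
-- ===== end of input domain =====

-- B replaces A's one-deletion-at-a-time BFS (deque + visited set + found flag) by direct
-- combinatorial generation: for k = 1, 2, … it enumerates all distinct length-(n-k)
-- subsequences recursively (take or skip the first character) and returns the size of the
-- first non-empty balanced filter; objective: alternative algorithm, same exponential cost.

-- ===== PORT A =====
-- helper isBalancedString (identical in Source A and Source B); the Python list used purely as a
-- stack (append / [-1] / pop) is transliterated as a head-consed list
def pvBalLoop : List Char → List Char → Bool
  | [], stack => stack.isEmpty
  | c :: rest, stack =>
    if c = '(' ∨ c = '{' ∨ c = '[' then pvBalLoop rest (c :: stack)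
    else match stack with
      | [] => false
      | top :: stack' =>
        if c = ')' ∧ top ≠ '(' then false
        else if c = '}' ∧ top ≠ '{' then false
        else if c = ']' ∧ top ≠ '[' then false
        else pvBalLoop rest stack'

def isBal (s : List Char) : Bool := pvBalLoop s []

-- theBracketString[:i] + theBracketString[i+1:]  (exact for the indices used, 0 ≤ i < len t)
def pvDelete (t : List Char) (i : Nat) : List Char := t.take i ++ t.drop (i + 1)

-- state = (bracketsVisited, queueOfBrackets, balancedSequences, isBracketFound)
abbrev PVState := PySem.Set (List Char) × List (List Char) × PySem.Set (List Char) × Bool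

-- inner 'for i in range(len(theBracketString))' loop of A
def pvAInner (t : List Char) (st : PVState) : PVState :=
  (List.range t.length).foldl (fun st i =>
    let u := pvDelete t i
    if PySem.Set.contains st.1 u then st
    else if isBal u then (PySem.Set.add st.1 u, st.2.1, PySem.Set.add st.2.2.1 u, true)
    else (PySem.Set.add st.1 u, st.2.1 ++ [u], st.2.2.1, st.2.2.2)) st

-- 'for iteration in range(lengthOfSequence)': pop left n times, processing each popped string
def pvALevel : Nat → PVState → PVState
  | 0, st => st
  | n + 1, st =>
    match st.2.1 with
    | [] => st          -- popleft on an empty deque: never reached (n is the queue length)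
    | t :: q' => pvALevel n (pvAInner t (st.1, q', st.2.2.1, st.2.2.2))

-- 'while queueOfBrackets and not isBracketFound' (fuel: each pass shortens the strings by one,
-- so len(s)+1 passes are more than the loop can ever make)
def pvAWhile : Nat → PVState → PVState
  | 0, st => st
  | fuel + 1, st =>
    if st.2.1 ≠ [] ∧ st.2.2.2 = false then
      pvAWhile fuel (pvALevel st.2.1.length st)
    else st

def countValidStrings (seqBrackets : String) : Int :=
  if isBal seqBrackets.toList then 0
  else
    ((pvAWhile (seqBrackets.toList.length + 1)
        (PySem.Set.empty, [seqBrackets.toList], PySem.Set.empty, false)).2.2.1.length : Int)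

-- ===== PORT B =====
-- _subseqs(s, m): all distinct subsequences of s of length m, as a set;
-- '{s[0] + t for t in _subseqs(s[1:], m-1)}' is the foldl of Set.add, '|' is Set.union
def pvSubseqs : List Char → Nat → PySem.Set (List Char)
  | _, 0 => PySem.Set.ofList [[]]
  | s, m + 1 =>
    if s.length < m + 1 then PySem.Set.empty
    else match s with
      | [] => PySem.Set.empty   -- unreachable: the length test above already returned
      | c :: rest =>
        PySem.Set.union
          ((pvSubseqs rest m).foldl (fun acc t => PySem.Set.add acc (c :: t)) PySem.Set.empty)
          (pvSubseqs rest (m + 1))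

-- 'for k in range(1, n + 1)' with the early return on a non-empty balanced set;
-- len of the balanced set comprehension = length of the (duplicate-free) filtered set
def pvBGo (s : List Char) (k : Nat) : Int :=
  if k < s.length + 1 then
    let bal := (pvSubseqs s (s.length - k)).filter isBal
    if bal ≠ [] then (bal.length : Int) else pvBGo s (k + 1)
  else 0
termination_by s.length + 1 - k

def countValidStrings_alt (seqBrackets : String) : Int :=
  if isBal seqBrackets.toList then 0
  else pvBGo seqBrackets.toList 1

-- ===== PRECONDITION & SPEC =====
def Spec_countValidStrings (seqBrackets : String) (out : Int) : Prop := out = countValidStrings_alt seqBrackets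
instance (seqBrackets : String) (out : Int) : Decidable (Spec_countValidStrings seqBrackets out) := by unfold Spec_countValidStrings; infer_instance

-- ===== CLAIM (what is proved, stated in full; the proofs are below) =====
def Claim_equal_countValidStrings : Prop := ∀ (seqBrackets : String), Dom_countValidStrings seqBrackets → Spec_countValidStrings seqBrackets (countValidStrings seqBrackets)

-- ===== LEMMAS AND PROOFS =====

-- all single-character deletions of t, in A's generation order
def pvChildList (t : List Char) : List (List Char) := (List.range t.length).map (pvDelete t)

def pvChildren (L : List (List Char)) : List (List Char) := L.flatMap pvChildList

-- A's inner loop as a fold over the generated strings themselves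
def pvInnerFold (cs : List (List Char)) (st : PVState) : PVState :=
  cs.foldl (fun st u =>
    if PySem.Set.contains st.1 u then st
    else if isBal u then (PySem.Set.add st.1 u, st.2.1, PySem.Set.add st.2.2.1 u, true)
    else (PySem.Set.add st.1 u, st.2.1 ++ [u], st.2.2.1, st.2.2.2)) st

-- the strings of cs not yet in visited set v, first occurrences in order
def pvNew (v : PySem.Set (List Char)) : List (List Char) → List (List Char)
  | [] => []
  | u :: cs => if PySem.Set.contains v u then pvNew v cs else u :: pvNew (PySem.Set.add v u) cs

lemma pvNew_drop (cs : List (List Char)) : ∀ v, pvNew v cs = (PySem.Set.update v cs).drop v.length := by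
  induction cs with
  | nil => intro v; simp [pvNew, PySem.Set.update_nil]
  | cons u cs ih =>
      intro v
      by_cases hv : PySem.Set.contains v u = true
      · have hm : u ∈ v := (PySem.Set.contains_iff v u).mp hv
        simp only [pvNew, hv, if_pos]
        rw [ih, PySem.Set.update_cons, PySem.Set.add_of_mem hm]
      · have hm : u ∉ v := fun h => hv ((PySem.Set.contains_iff v u).mpr h)
        simp only [pvNew, hv, Bool.false_eq_true, if_false]
        rw [ih, PySem.Set.update_cons, PySem.Set.add_of_not_mem hm]
        rw [PySem.Set.update_eq_append_filter]
        have h2 : ∀ (X : List (List Char)),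
            u :: List.drop (v ++ [u]).length (v ++ [u] ++ X) = List.drop v.length (v ++ [u] ++ X) := by
          intro X
          rw [List.drop_left, show v ++ [u] ++ X = v ++ (u :: X) by simp, List.drop_left]
        exact h2 _

lemma pvNew_disjoint (cs : List (List Char)) (v : PySem.Set (List Char)) (h : ∀ u ∈ cs, u ∉ v) :
    pvNew v cs = PySem.Set.ofList cs := by
  rw [pvNew_drop, PySem.Set.update_eq_append_filter]
  have hf : (PySem.Set.ofList cs).filter (fun y => !(PySem.Set.contains v y)) = PySem.Set.ofList cs := by
    apply List.filter_eq_self.mpr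
    intro u hu
    rw [PySem.Set.mem_ofList] at hu
    have hm : u ∉ v := h u hu
    cases hc : PySem.Set.contains v u with
    | false => simp
    | true => exact absurd ((PySem.Set.contains_iff v u).mp hc) hm
  rw [hf, List.drop_left]

lemma pvAInner_eq (t : List Char) (st : PVState) :
    pvAInner t st = pvInnerFold (pvChildList t) st := by
  unfold pvAInner pvInnerFold pvChildList
  rw [List.foldl_map]

lemma length_pvDelete (t : List Char) (i : Nat) (h : i < t.length) :
    (pvDelete t i).length = t.length - 1 := by
  simp [pvDelete]; omega

lemma pvInnerFold_queue (cs : List (List Char)) (v : PySem.Set (List Char))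
    (q : List (List Char)) (b : PySem.Set (List Char)) (f : Bool) :
    pvInnerFold cs (v, q, b, f) =
      ((pvInnerFold cs (v, [], b, f)).1,
       q ++ (pvInnerFold cs (v, [], b, f)).2.1,
       (pvInnerFold cs (v, [], b, f)).2.2.1,
       (pvInnerFold cs (v, [], b, f)).2.2.2) := by
  induction cs generalizing v q b f with
  | nil => simp [pvInnerFold]
  | cons u cs ih =>
      simp only [pvInnerFold, List.foldl_cons]
      show pvInnerFold cs _ = _
      by_cases hv : PySem.Set.contains v u = true
      · simp only [hv, if_pos]
        exact ih v q b f
      · simp only [hv, Bool.false_eq_true, if_false]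
        by_cases hb : isBal u = true
        · simp only [hb, if_pos]
          exact ih (PySem.Set.add v u) q (PySem.Set.add b u) true
        · simp only [hb, Bool.false_eq_true, if_false, List.nil_append]
          have h1 := ih (PySem.Set.add v u) (q ++ [u]) b f
          have h2 := ih (PySem.Set.add v u) [u] b f
          simp only [pvInnerFold] at h1 h2 ⊢
          rw [h1, h2]
          simp [List.append_assoc]

lemma pvInnerFold_spec (cs : List (List Char)) (v : PySem.Set (List Char))
    (q : List (List Char)) (b : PySem.Set (List Char)) (f : Bool) :
    pvInnerFold cs (v, q, b, f) =
      (PySem.Set.update v cs,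
       q ++ (pvNew v cs).filter (fun u => !isBal u),
       PySem.Set.update b ((pvNew v cs).filter isBal),
       f || (pvNew v cs).any isBal) := by
  induction cs generalizing v q b f with
  | nil => simp [pvInnerFold, pvNew, PySem.Set.update_nil]
  | cons u cs ih =>
      simp only [pvInnerFold, List.foldl_cons]
      show pvInnerFold cs _ = _
      by_cases hv : PySem.Set.contains v u = true
      · have hm : u ∈ v := (PySem.Set.contains_iff v u).mp hv
        simp only [hv, if_pos, pvNew, PySem.Set.update_cons, PySem.Set.add_of_mem hm]
        exact ih v q b f
      · have hm : u ∉ v := fun h => hv ((PySem.Set.contains_iff v u).mpr h)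
        simp only [hv, Bool.false_eq_true, if_false, pvNew, PySem.Set.update_cons]
        by_cases hb : isBal u = true
        · simp only [hb, if_pos]
          rw [ih (PySem.Set.add v u) q (PySem.Set.add b u) true]
          simp [hb, PySem.Set.update_cons]
        · simp only [hb, Bool.false_eq_true, if_false]
          rw [ih (PySem.Set.add v u) (q ++ [u]) b f]
          simp [hb, List.append_assoc]

lemma pvALevel_run (q r : List (List Char)) (v b : PySem.Set (List Char)) (f : Bool) :
    pvALevel q.length (v, q ++ r, b, f) =
      ((pvInnerFold (pvChildren q) (v, [], b, f)).1,
       r ++ (pvInnerFold (pvChildren q) (v, [], b, f)).2.1,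
       (pvInnerFold (pvChildren q) (v, [], b, f)).2.2.1,
       (pvInnerFold (pvChildren q) (v, [], b, f)).2.2.2) := by
  induction q generalizing r v b f with
  | nil => simp [pvALevel, pvChildren, pvInnerFold]
  | cons t ts ih =>
      simp only [List.length_cons, List.cons_append, pvALevel]
      rw [pvAInner_eq]
      have hsplit : pvInnerFold (pvChildren (t :: ts)) (v, [], b, f)
          = pvInnerFold (pvChildren ts) (pvInnerFold (pvChildList t) (v, [], b, f)) := by
        simp only [pvChildren, List.flatMap_cons, pvInnerFold, List.foldl_append]
      rcases hX : pvInnerFold (pvChildList t) (v, [], b, f) with ⟨v1, c1, b1, f1⟩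
      rw [pvInnerFold_queue, hX]
      simp only
      rw [show (ts ++ r) ++ c1 = ts ++ (r ++ c1) from List.append_assoc ts r c1]
      rw [ih (r ++ c1) v1 b1 f1]
      rw [hsplit, hX, pvInnerFold_queue (pvChildren ts) v1 c1 b1 f1]
      simp [List.append_assoc]

lemma pvAWhile_found (k : Nat) (v : PySem.Set (List Char)) (q : List (List Char))
    (b : PySem.Set (List Char)) : pvAWhile k (v, q, b, true) = (v, q, b, true) := by
  cases k <;> simp [pvAWhile]

-- deletions are exactly the sublists one shorter
lemma pvDelete_sublist (t : List Char) (i : Nat) : (pvDelete t i).Sublist t := by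
  have h1 : (t.drop (i + 1)).Sublist (t.drop i) := by
    by_cases h : i < t.length
    · rw [List.drop_eq_getElem_cons h]
      exact (List.sublist_cons_self _ _)
    · rw [List.drop_eq_nil_of_le (by omega), List.drop_eq_nil_of_le (by omega)]
  have := List.Sublist.append (List.Sublist.refl (t.take i)) h1
  rw [List.take_append_drop] at this
  exact this

lemma exists_delete_of_sublist (u t : List Char) (h : u.Sublist t)
    (hl : u.length + 1 = t.length) : ∃ i < t.length, u = pvDelete t i := by
  induction h with
  | slnil => simp at hl
  | @cons l₁ l₂ a h ih =>
      have : l₁.length = l₂.length := by simp at hl; omega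
      have hu : l₁ = l₂ := h.eq_of_length this
      exact ⟨0, by simp, by simp [pvDelete, hu]⟩
  | @cons₂ l₁ l₂ a h ih =>
      obtain ⟨i, hi, hu⟩ := ih (by simp at hl ⊢; omega)
      refine ⟨i + 1, by simp; omega, ?_⟩
      simp only [pvDelete, List.take_succ_cons, List.drop_succ_cons, List.cons_append] at hu ⊢
      rw [← hu]

lemma exists_sublist_succ (u s : List Char) (h : u.Sublist s) (hl : u.length < s.length) :
    ∃ t, u.Sublist t ∧ t.Sublist s ∧ t.length = u.length + 1 := by
  induction h with
  | slnil => simp at hl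
  | @cons l₁ l₂ a h ih =>
      by_cases hlt : l₁.length < l₂.length
      · obtain ⟨t, h1, h2, h3⟩ := ih hlt
        exact ⟨t, h1, h2.cons a, h3⟩
      · have heq : l₁ = l₂ := h.eq_of_length (by have := h.length_le; omega)
        exact ⟨a :: l₂, by rw [heq]; exact List.sublist_cons_self a l₂,
          List.Sublist.refl _, by simp [← heq]⟩
  | @cons₂ l₁ l₂ a h ih =>
      obtain ⟨t, h1, h2, h3⟩ := ih (by simpa using hl)
      exact ⟨a :: t, h1.cons₂ a, h2.cons₂ a, by simp [h3]⟩

lemma mem_pvChildren (q : List (List Char)) (u : List Char) :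
    u ∈ pvChildren q ↔ ∃ t ∈ q, ∃ i < t.length, u = pvDelete t i := by
  simp only [pvChildren, List.mem_flatMap, pvChildList, List.mem_map, List.mem_range]
  constructor
  · rintro ⟨t, ht, i, hi, rfl⟩; exact ⟨t, ht, i, hi, rfl⟩
  · rintro ⟨t, ht, i, hi, rfl⟩; exact ⟨t, ht, i, hi, rfl⟩

-- membership of B's recursive subsequence enumeration
lemma mem_pvSubseqs (s : List Char) : ∀ (m : Nat) (u : List Char),
    u ∈ pvSubseqs s m ↔ u.Sublist s ∧ u.length = m := by
  have h0 : ∀ s : List Char, pvSubseqs s 0 = [[]] := by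
    intro s; cases s <;> rfl
  induction s with
  | nil =>
      intro m u
      cases m with
      | zero =>
          rw [h0, List.mem_singleton]
          constructor
          · rintro rfl; exact ⟨List.Sublist.refl _, rfl⟩
          · rintro ⟨h, _⟩; exact List.sublist_nil.mp h
      | succ m =>
          simp only [pvSubseqs]
          constructor
          · intro h; cases (show u ∈ ([] : List (List Char)) from h)
          · rintro ⟨h, hl⟩
            have := List.sublist_nil.mp h
            subst this; simp at hl
  | cons c rest ih =>
      intro m u
      cases m with
      | zero =>
          rw [h0, List.mem_singleton]
          constructor
          · rintro rfl; exact ⟨List.nil_sublist _, rfl⟩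
          · rintro ⟨_, hl⟩; exact List.eq_nil_of_length_eq_zero hl
      | succ m =>
          by_cases hlen : (c :: rest).length < m + 1
          · simp only [pvSubseqs, if_pos hlen]
            constructor
            · intro h; cases (show u ∈ ([] : List (List Char)) from h)
            · rintro ⟨h, hl⟩
              have := h.length_le
              omega
          · simp only [pvSubseqs, if_neg hlen]
            rw [PySem.Set.mem_union, ← PySem.Set.update_map_eq_foldl_add,
                PySem.Set.update_empty, PySem.Set.mem_ofList]
            simp only [List.mem_map]
            constructor
            · rintro (⟨t, ht, rfl⟩ | h)
              · obtain ⟨h1, h2⟩ := (ih m t).mp ht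
                exact ⟨h1.cons₂ c, by simp [h2]⟩
              · obtain ⟨h1, h2⟩ := (ih (m + 1) u).mp h
                exact ⟨h1.cons c, h2⟩
            · rintro ⟨h, hl⟩
              cases u with
              | nil => simp at hl
              | cons d u' =>
                  cases h with
                  | cons _ h1 => exact Or.inr ((ih (m + 1) (d :: u')).mpr ⟨h1, hl⟩)
                  | cons₂ _ h2 => exact Or.inl ⟨u', (ih m u').mpr ⟨h2, by simpa using hl⟩, rfl⟩

lemma nodup_pvSubseqs (s : List Char) : ∀ (m : Nat), (pvSubseqs s m).Nodup := by
  induction s with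
  | nil =>
      intro m
      cases m with
      | zero => show ([[]] : List (List Char)).Nodup; simp
      | succ m => simp only [pvSubseqs]; exact List.nodup_nil
  | cons c rest ih =>
      intro m
      cases m with
      | zero => show ([[]] : List (List Char)).Nodup; simp
      | succ m =>
          by_cases hlen : (c :: rest).length < m + 1
          · simp only [pvSubseqs, if_pos hlen]; exact List.nodup_nil
          · simp only [pvSubseqs, if_neg hlen]
            apply PySem.Set.nodup_union
            rw [← PySem.Set.update_map_eq_foldl_add, PySem.Set.update_empty]
            exact PySem.Set.nodup_ofList _

-- the one-step level characterisation: deletions of all sublists of length m+1 are all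
-- sublists of length m (when some sublist of length m+1 exists, i.e. m+1 ≤ |s0|)
lemma children_char (q : List (List Char)) (s0 : List Char) (m : Nat)
    (hq : ∀ u, u ∈ q ↔ (u.Sublist s0 ∧ u.length = m + 1)) (hn : m + 1 ≤ s0.length) :
    ∀ u, u ∈ pvChildren q ↔ (u.Sublist s0 ∧ u.length = m) := by
  intro u
  rw [mem_pvChildren]
  constructor
  · rintro ⟨t, ht, i, hi, rfl⟩
    obtain ⟨h1, h2⟩ := (hq t).mp ht
    exact ⟨(pvDelete_sublist t i).trans h1, by rw [length_pvDelete t i hi, h2]; omega⟩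
  · rintro ⟨h, hl⟩
    obtain ⟨t, h1, h2, h3⟩ := exists_sublist_succ u s0 h (by omega)
    obtain ⟨i, hi, hu⟩ := exists_delete_of_sublist u t h1 (by omega)
    exact ⟨t, (hq t).mpr ⟨h2, by omega⟩, i, hi, hu⟩

-- the main induction: one pass of A's while loop against one iteration of B's for loop
lemma pvMain (s0 : List Char) (k : Nat) :
    ∀ (ℓ : Nat) (v : PySem.Set (List Char)) (q : List (List Char)),
    q ≠ [] → q.Nodup → (∀ u, u ∈ q ↔ (u.Sublist s0 ∧ u.length = ℓ)) →
    (∀ t ∈ q, isBal t = false) → (∀ u ∈ v, ℓ ≤ u.length) → ℓ ≤ k → ℓ ≤ s0.length →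
    ((pvAWhile (k + 1) (v, q, PySem.Set.empty, false)).2.2.1.length : Int)
      = pvBGo s0 (s0.length - ℓ + 1) := by
  have hbalnil : isBal [] = true := rfl
  induction k with
  | zero =>
      intro ℓ v q hq _ hmem hnb _ hk _
      obtain ⟨t, ts, rfl⟩ := List.exists_cons_of_ne_nil hq
      have htl : t.length = ℓ := ((hmem t).mp (by simp)).2
      have ht0 : t.length = 0 := by omega
      have hte : t = [] := List.eq_nil_of_length_eq_zero ht0
      have hfalse := hnb t (by simp)
      rw [hte, hbalnil] at hfalse
      exact Bool.noConfusion hfalse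
  | succ k ih =>
      intro ℓ v q hq hnd hmem hnb hv hk hn
      obtain ⟨t, ts, rfl⟩ := List.exists_cons_of_ne_nil hq
      set q := t :: ts with hqdef
      have htmem : t ∈ q := by simp [hqdef]
      have htl : t.length = ℓ := ((hmem t).mp htmem).2
      have hl1 : 1 ≤ ℓ := by
        by_contra h
        have hte : t = [] := List.eq_nil_of_length_eq_zero (by omega)
        have := hnb t htmem
        rw [hte, hbalnil] at this
        simp at this
      obtain ⟨m, rfl⟩ : ∃ m, ℓ = m + 1 := ⟨ℓ - 1, by omega⟩
      -- one pass of A's while loop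
      have hstep : pvAWhile (k + 1 + 1) (v, q, PySem.Set.empty, false)
          = pvAWhile (k + 1) (pvALevel q.length (v, q, PySem.Set.empty, false)) := by
        rw [pvAWhile]
        simp [hqdef]
      have hlevel := pvALevel_run q [] v PySem.Set.empty false
      rw [List.append_nil] at hlevel
      -- the children as a set: exactly the sublists of s0 of length m
      have hchar := children_char q s0 m hmem hn
      have hchlen : ∀ u ∈ pvChildren q, u.length = m := fun u hu => ((hchar u).mp hu).2
      have hdisj : ∀ u ∈ pvChildren q, u ∉ v := by
        intro u hu hmemv
        have := hv u hmemv
        rw [hchlen u hu] at this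
        omega
      have hspec := pvInnerFold_spec (pvChildren q) v [] PySem.Set.empty false
      rw [pvNew_disjoint _ _ hdisj] at hspec
      set C := PySem.Set.ofList (pvChildren q) with hCdef
      have hCmem : ∀ u, u ∈ C ↔ (u.Sublist s0 ∧ u.length = m) := by
        intro u
        rw [hCdef, PySem.Set.mem_ofList]
        exact hchar u
      have hCnd : C.Nodup := PySem.Set.nodup_ofList _
      -- C is non-empty: it contains a deletion of t
      have hCne : C ≠ [] := by
        have h0 : pvDelete t 0 ∈ pvChildren q := by
          rw [mem_pvChildren]
          exact ⟨t, htmem, 0, by omega, rfl⟩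
        have : pvDelete t 0 ∈ C := by rw [hCdef, PySem.Set.mem_ofList]; exact h0
        exact List.ne_nil_of_mem this
      -- B's set at this iteration is a permutation of C
      have hperm : (pvSubseqs s0 m).Perm C := by
        rw [List.perm_ext_iff_of_nodup (nodup_pvSubseqs s0 m) hCnd]
        intro u
        rw [mem_pvSubseqs, hCmem]
      have hpermf : ((pvSubseqs s0 m).filter isBal).Perm (C.filter isBal) := hperm.filter _
      -- unfold one iteration of B's for loop
      have harith1 : s0.length - (m + 1) + 1 < s0.length + 1 := by omega
      have harith2 : s0.length - (s0.length - (m + 1) + 1) = m := by omega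
      have hB : pvBGo s0 (s0.length - (m + 1) + 1)
          = if ((pvSubseqs s0 m).filter isBal) ≠ [] then
              (((pvSubseqs s0 m).filter isBal).length : Int)
            else pvBGo s0 (s0.length - (m + 1) + 1 + 1) := by
        rw [pvBGo]
        rw [if_pos harith1, harith2]
      by_cases hbal : C.filter isBal = []
      · -- no balanced string at this level: both sides move on
        have hbalB : (pvSubseqs s0 m).filter isBal = [] :=
          List.eq_nil_of_length_eq_zero (by rw [hpermf.length_eq, hbal]; rfl)
        have hnb' : ∀ u ∈ C, isBal u = false := by
          intro u hu
          have := List.filter_eq_nil_iff.mp hbal u hu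
          simpa using this
        have hany : C.any isBal = false := by
          rw [List.any_eq_false]
          intro u hu
          simp [hnb' u hu]
        have hqkeep : C.filter (fun u => !isBal u) = C := by
          apply List.filter_eq_self.mpr
          intro u hu
          simp [hnb' u hu]
        rw [hstep, hlevel, hspec, hbal, hqkeep, hany, PySem.Set.update_nil]
        simp only [List.nil_append, Bool.or_false]
        rw [hB, if_neg (by simp [hbalB])]
        have harith3 : s0.length - (m + 1) + 1 + 1 = s0.length - m + 1 := by omega
        rw [harith3]
        apply ih m (PySem.Set.update v (pvChildren q)) C hCne hCnd hCmem hnb'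
        · intro u hu
          rw [PySem.Set.mem_update] at hu
          rcases hu with h | h
          · have := hv u h; omega
          · rw [hchlen u h]
        · omega
        · omega
      · -- balanced strings found: A stops with found = true, B returns the level's size
        have hbalB : (pvSubseqs s0 m).filter isBal ≠ [] := by
          intro hc
          apply hbal
          exact List.eq_nil_of_length_eq_zero (by rw [← hpermf.length_eq, hc]; rfl)
        obtain ⟨x, xs, hx⟩ := List.exists_cons_of_ne_nil hbal
        have hxmem : x ∈ C.filter isBal := by rw [hx]; simp
        have hany : C.any isBal = true := by
          rw [List.any_eq_true]
          obtain ⟨hm1, hm2⟩ := List.mem_filter.mp hxmem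
          exact ⟨x, hm1, hm2⟩
        have hnodup : (C.filter isBal).Nodup := hCnd.filter _
        rw [hstep, hlevel, hspec, hany]
        simp only [Bool.or_true]
        rw [pvAWhile_found]
        simp only
        rw [PySem.Set.update_empty, PySem.Set.ofList_eq_self_of_nodup _ hnodup]
        rw [hB, if_pos hbalB, hpermf.length_eq]

-- ===== VERDICT (by name: the statement is the Claim_ definition above) =====
theorem countValidStrings_spec : Claim_equal_countValidStrings := by
  intro s _
  unfold Spec_countValidStrings countValidStrings countValidStrings_alt
  by_cases h : isBal s.toList = true
  · simp [h]
  · simp only [h, Bool.false_eq_true, if_false]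
    have hmain := pvMain s.toList s.toList.length s.toList.length PySem.Set.empty [s.toList]
      (by simp) (by simp)
      (by
        intro u
        simp only [List.mem_singleton]
        constructor
        · rintro rfl; exact ⟨List.Sublist.refl _, rfl⟩
        · rintro ⟨h1, h2⟩; exact h1.eq_of_length h2)
      (by intro t ht; simp only [List.mem_singleton] at ht; rw [ht]; simpa using h)
      (by intro u hu; cases (show u ∈ ([] : List (List Char)) from hu))
      (by omega) (by omega)
    rw [show s.toList.length - s.toList.length + 1 = 1 from by omega] at hmain
    exact hmain
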